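-- pv_equiv track=rewrite | github.com/paul17crib/envoy-cli | envoy/grouper.py | group_by_suffix
-- ===== SOURCE A (Python) =====
-- from collections import defaultdict
-- from typing import Dict, List, Optional
--
-- def group_by_suffix(env: dict, delimiter: str = "_") -> Dict[str, dict]:
--     """Group env keys by their last segment after the delimiter."""
--     groups: Dict[str, dict] = defaultdict(dict)
--     for key, value in env.items():
--         if delimiter in key:
--             suffix = key.rsplit(delimiter, 1)[-1]
--         else:
--             suffix = "__ungrouped__"
--         groups[suffix][key] = value
--     return dict(groups)
-- ===== SOURCE B (Python) =====
-- def group_by_suffix(env: dict, delimiter: str = "_"):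
--     """Group env keys by their last segment after the delimiter (two-pass: collect suffixes, then filter per suffix)."""
--     def _suffix(key):
--         return key.rsplit(delimiter, 1)[-1] if delimiter in key else "__ungrouped__"
--     suffixes = dict.fromkeys(_suffix(k) for k in env)
--     return {s: {k: v for k, v in env.items() if _suffix(k) == s} for s in suffixes}
-- ===== Notes on version B (the rewrite author's own statement) =====
-- stated objective: alternative
-- what changed: A buckets in one pass into a defaultdict of dicts; B makes two passes: it first collects the distinct suffixes in order of first appearance (dict.fromkeys) and then builds each group by filtering the items for that suffix.
import Mathlib
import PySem

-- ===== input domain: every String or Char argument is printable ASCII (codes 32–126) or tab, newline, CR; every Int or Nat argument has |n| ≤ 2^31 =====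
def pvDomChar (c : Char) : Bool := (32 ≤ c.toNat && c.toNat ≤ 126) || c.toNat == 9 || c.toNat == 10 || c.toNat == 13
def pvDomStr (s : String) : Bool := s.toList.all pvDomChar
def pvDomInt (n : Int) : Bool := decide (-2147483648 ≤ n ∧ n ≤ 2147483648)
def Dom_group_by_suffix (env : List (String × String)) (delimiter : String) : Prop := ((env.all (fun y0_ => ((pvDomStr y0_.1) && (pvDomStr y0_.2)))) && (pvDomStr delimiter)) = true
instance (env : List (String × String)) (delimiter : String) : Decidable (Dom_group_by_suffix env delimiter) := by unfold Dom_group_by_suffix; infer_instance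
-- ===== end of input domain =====

-- B changes the decomposition only (two passes instead of one bucketing pass); values and order are identical.
-- The 'env' parameter is a Python dict: both ports normalise the association list through PySem.Dict.ofList first.

-- ===== PORT A =====
-- suffix rule shared by both Pythons: key.rsplit(delimiter, 1)[-1] if delimiter in key else "__ungrouped__".
-- rsplit(d, 1)[-1] is ported by hand as the substring after the LAST occurrence of d (exact for d ≠ "",
-- which Pre_ guarantees whenever the loop body runs).
def pvSuffix (delimiter key : String) : String :=
  if PySem.Str.isIn delimiter key then
    String.ofList (key.toList.drop ((PySem.Chars.rfind key.toList delimiter.toList).toNat + delimiter.toList.length))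
  else "__ungrouped__"

-- loop body of A: groups[suffix][key] = value on a defaultdict(dict)
def pvStep (delimiter : String) (g : PySem.Dict String (PySem.Dict String String))
    (kv : String × String) : PySem.Dict String (PySem.Dict String String) :=
  let s := pvSuffix delimiter kv.1
  g.insert s ((g.getD s PySem.Dict.empty).insert kv.1 kv.2)

def group_by_suffix (env : List (String × String)) (delimiter : String) :
    List (String × List (String × String)) :=
  (((PySem.Dict.ofList env).items.foldl (pvStep delimiter) PySem.Dict.empty).items).map
    (fun p => (p.1, p.2.items))

-- ===== PORT B =====
def group_by_suffix_alt (env : List (String × String)) (delimiter : String) :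
    List (String × List (String × String)) :=
  (PySem.List.dedup ((PySem.Dict.ofList env).items.map (fun kv => pvSuffix delimiter kv.1))).map
    (fun s => (s, (PySem.Dict.ofList env).items.filter (fun kv => pvSuffix delimiter kv.1 == s)))

-- ===== PRECONDITION & SPEC =====
-- Python's str.rsplit raises ValueError on an empty separator, so A raises on delimiter = "" unless env is empty.
def Pre_group_by_suffix (env : List (String × String)) (delimiter : String) : Prop :=
  delimiter ≠ "" ∨ env = []
instance (env : List (String × String)) (delimiter : String) : Decidable (Pre_group_by_suffix env delimiter) := by unfold Pre_group_by_suffix; infer_instance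

def pvWitness_group_by_suffix : (List (String × String)) × String :=
  ([("DB_HOST", "x"), ("DB_PORT", "5432"), ("PATH", "p")], "_")

def Spec_group_by_suffix (env : List (String × String)) (delimiter : String) (out : List (String × List (String × String))) : Prop := out = group_by_suffix_alt env delimiter
instance (env : List (String × String)) (delimiter : String) (out : List (String × List (String × String))) : Decidable (Spec_group_by_suffix env delimiter out) := by unfold Spec_group_by_suffix; infer_instance

-- ===== CLAIM (what is proved, stated in full; the proofs are below) =====
def Claim_equal_group_by_suffix : Prop := ∀ (env : List (String × String)) (delimiter : String), Dom_group_by_suffix env delimiter → Pre_group_by_suffix env delimiter → Spec_group_by_suffix env delimiter (group_by_suffix env delimiter)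

-- ===== LEMMAS AND PROOFS =====

-- ordered dedup of a snoc (dict.fromkeys seen-set step)
lemma pv_dedup_app {α : Type} [BEq α] [LawfulBEq α] (xs : List α) (x : α) :
    PySem.List.dedup (xs ++ [x]) =
      if x ∈ PySem.List.dedup xs then PySem.List.dedup xs else PySem.List.dedup xs ++ [x] := by
  simp [PySem.List.dedup_eq_ofList, PySem.Set.ofList_eq_foldl, List.foldl_append, PySem.Set.add]


lemma pv_main (delimiter : String) (l : List (String × String)) (h : (l.map (·.1)).Nodup) :
    (l.foldl (pvStep delimiter) PySem.Dict.empty).items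
      = (PySem.List.dedup (l.map (fun kv => pvSuffix delimiter kv.1))).map
          (fun s => (s, PySem.Dict.mk (l.filter (fun kv => pvSuffix delimiter kv.1 == s)))) := by
  induction l using List.reverseRecOn with
  | nil => rfl
  | append_singleton l' kv ih =>
    rw [List.map_append, List.nodup_append] at h
    obtain ⟨h1, -, h2⟩ := h
    have hk1 : kv.1 ∉ l'.map (·.1) := by
      intro hm; exact h2 _ hm kv.1 (by simp) rfl
    have IH := ih h1
    rw [List.foldl_append, List.foldl_cons, List.foldl_nil]
    rw [List.map_append]
    simp only [List.map_cons, List.map_nil]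
    rw [pv_dedup_app]
    by_cases hs : pvSuffix delimiter kv.1 ∈ PySem.List.dedup (l'.map (fun kv => pvSuffix delimiter kv.1))
    · -- suffix already present: overwrite in place
      rw [if_pos hs]
      have hc : (l'.foldl (pvStep delimiter) PySem.Dict.empty).contains (pvSuffix delimiter kv.1) = true := by
        rw [PySem.Dict.contains_iff_mem_keys]
        simp only [PySem.Dict.keys, IH, List.map_map, Function.comp_def]
        simpa using hs
      have hnodupkeys : (l'.foldl (pvStep delimiter) PySem.Dict.empty).keys.Nodup := by
        simp only [PySem.Dict.keys, IH, List.map_map, Function.comp_def]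
        simp
      have hmem : (pvSuffix delimiter kv.1,
          PySem.Dict.mk (l'.filter (fun kv' => pvSuffix delimiter kv'.1 == pvSuffix delimiter kv.1)))
          ∈ (l'.foldl (pvStep delimiter) PySem.Dict.empty).items := by
        rw [IH]; exact List.mem_map_of_mem hs
      have hget : (l'.foldl (pvStep delimiter) PySem.Dict.empty).getD (pvSuffix delimiter kv.1) PySem.Dict.empty
          = PySem.Dict.mk (l'.filter (fun kv' => pvSuffix delimiter kv'.1 == pvSuffix delimiter kv.1)) := by
        rw [PySem.Dict.getD_eq_get?_getD, PySem.Dict.get?_of_mem_items _ hmem hnodupkeys]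
        rfl
      have hinner_nc : (PySem.Dict.mk (l'.filter (fun kv' => pvSuffix delimiter kv'.1 == pvSuffix delimiter kv.1))).contains kv.1 = false := by
        rw [Bool.eq_false_iff]
        intro hcc
        rw [PySem.Dict.contains_iff_mem_keys] at hcc
        simp only [PySem.Dict.keys, List.mem_map] at hcc
        obtain ⟨p, hp, hpe⟩ := hcc
        exact hk1 (List.mem_map.mpr ⟨p, List.mem_of_mem_filter hp, hpe⟩)
      show ((l'.foldl (pvStep delimiter) PySem.Dict.empty).insert (pvSuffix delimiter kv.1) _).items = _
      rw [hget, PySem.Dict.items_insert_of_contains _ _ hc, IH, List.map_map]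
      apply List.map_congr_left
      intro s hsmem
      simp only [Function.comp_def]
      by_cases hse : s = pvSuffix delimiter kv.1
      · subst hse
        simp only [beq_self_eq_true, if_pos]
        refine congrArg (Prod.mk (pvSuffix delimiter kv.1)) ?_
        apply PySem.Dict.ext
        rw [PySem.Dict.items_insert_of_not_contains _ _ hinner_nc]
        simp [List.filter_append]
      · have h3 : (s == pvSuffix delimiter kv.1) = false := by
          simpa using hse
        have h4 : (pvSuffix delimiter kv.1 == s) = false := by
          simpa using fun he => hse he.symm
        simp only [h3, Bool.false_eq_true, if_false]
        refine congrArg (Prod.mk s) ?_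
        refine congrArg PySem.Dict.mk ?_
        rw [List.filter_append]
        simp [h4]
    · -- new suffix: append a fresh singleton group
      rw [if_neg hs]
      have hc : (l'.foldl (pvStep delimiter) PySem.Dict.empty).contains (pvSuffix delimiter kv.1) = false := by
        rw [Bool.eq_false_iff]
        intro hcc
        rw [PySem.Dict.contains_iff_mem_keys] at hcc
        simp only [PySem.Dict.keys, IH, List.map_map, Function.comp_def] at hcc
        exact hs (by simpa using hcc)
      have hfl : l'.filter (fun kv' => pvSuffix delimiter kv'.1 == pvSuffix delimiter kv.1) = [] := by
        rw [List.filter_eq_nil_iff]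
        intro p hp hpe
        exact hs (by
          rw [PySem.List.mem_dedup]
          exact List.mem_map.mpr ⟨p, hp, by simpa using hpe⟩)
      show ((l'.foldl (pvStep delimiter) PySem.Dict.empty).insert (pvSuffix delimiter kv.1) _).items = _
      rw [PySem.Dict.getD_of_not_contains _ _ hc,
        PySem.Dict.items_insert_of_not_contains _ _ hc, IH, List.map_append]
      congr 1
      · apply List.map_congr_left
        intro s hsmem
        have h4 : (pvSuffix delimiter kv.1 == s) = false := by
          simpa using fun he : pvSuffix delimiter kv.1 = s => hs (he ▸ hsmem)
        refine congrArg (Prod.mk s) ?_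
        refine congrArg PySem.Dict.mk ?_
        rw [List.filter_append]
        simp [h4]
      · simp only [List.map_cons, List.map_nil]
        refine congrArg (fun d => [(pvSuffix delimiter kv.1, d)]) ?_
        apply PySem.Dict.ext
        rw [PySem.Dict.items_insert_of_not_contains _ _ (PySem.Dict.contains_empty _)]
        rw [List.filter_append, hfl]
        simp [PySem.Dict.empty]

-- the invariant above relates A's one-pass bucketing to B's suffix list + per-suffix filter

-- ===== VERDICT (by name: the statement is the Claim_ definition above) =====
theorem group_by_suffix_spec : Claim_equal_group_by_suffix := by
  intro env delimiter _ _
  unfold Spec_group_by_suffix group_by_suffix group_by_suffix_alt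
  have h := PySem.Dict.nodup_keys_ofList (κ := String) (ν := String) env
  simp only [PySem.Dict.keys] at h
  rw [pv_main delimiter _ h, List.map_map]
  rfl
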